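-- pv_equiv track=rewrite | github.com/AkhileshUkey84/SORA | backend/demo_config.py | generate_sample_questions
-- ===== SOURCE A (Python) =====
-- def generate_sample_questions(dataset_name, columns):
--     """Generate sample questions for each dataset based on column names"""
--
--     questions = []
--     column_names = [col.lower() for col in columns]
--
--     # Generic questions
--     questions.append("Show me a summary of this data")
--     questions.append("What are the key patterns in this dataset?")
--
--     # Date-based questions
--     date_cols = [col for col in column_names if any(word in col for word in ['date', 'time', 'created'])]
--     if date_cols:
--         questions.append(f"Show me trends over time")
--         questions.append("Which day of the week has the most activity?")
--
--     # Categorical questions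
--     cat_cols = [col for col in column_names if any(word in col for word in ['type', 'category', 'status', 'industry', 'department'])]
--     if cat_cols:
--         questions.append(f"Break down the data by {cat_cols[0]}")
--         questions.append("Which category performs best?")
--
--     # Numeric questions
--     num_cols = [col for col in column_names if any(word in col for word in ['amount', 'value', 'price', 'sales', 'revenue', 'count'])]
--     if num_cols:
--         questions.append("What are the top values?")
--         questions.append("Show me the distribution of amounts")
--
--     return questions[:6]  # Limit to 6 sample questions
-- ===== SOURCE B (Python) =====
-- def generate_sample_questions(dataset_name, columns):
--     """Generate sample questions for each dataset based on column names"""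
--     has_date = has_num = False
--     first_cat = None
--     # single classifying pass over the columns
--     for col in columns:
--         c = col.lower()
--         if not has_date and any(w in c for w in ('date', 'time', 'created')):
--             has_date = True
--         if first_cat is None and any(w in c for w in ('type', 'category', 'status', 'industry', 'department')):
--             first_cat = c
--         if not has_num and any(w in c for w in ('amount', 'value', 'price', 'sales', 'revenue', 'count')):
--             has_num = True
--     questions = ["Show me a summary of this data",
--                  "What are the key patterns in this dataset?"]
--     if has_date:
--         questions += ["Show me trends over time",
--                       "Which day of the week has the most activity?"]
--     if first_cat is not None:
--         questions += [f"Break down the data by {first_cat}",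
--                       "Which category performs best?"]
--     if has_num:
--         questions += ["What are the top values?",
--                       "Show me the distribution of amounts"]
--     return questions[:6]
-- ===== Notes on version B (the rewrite author's own statement) =====
-- stated objective: simpler
-- what changed: B replaces A's three intermediate filtered column lists with one classifying pass over the columns that records two flags and the first categorical column, then assembles the question list from those.
import Mathlib
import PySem

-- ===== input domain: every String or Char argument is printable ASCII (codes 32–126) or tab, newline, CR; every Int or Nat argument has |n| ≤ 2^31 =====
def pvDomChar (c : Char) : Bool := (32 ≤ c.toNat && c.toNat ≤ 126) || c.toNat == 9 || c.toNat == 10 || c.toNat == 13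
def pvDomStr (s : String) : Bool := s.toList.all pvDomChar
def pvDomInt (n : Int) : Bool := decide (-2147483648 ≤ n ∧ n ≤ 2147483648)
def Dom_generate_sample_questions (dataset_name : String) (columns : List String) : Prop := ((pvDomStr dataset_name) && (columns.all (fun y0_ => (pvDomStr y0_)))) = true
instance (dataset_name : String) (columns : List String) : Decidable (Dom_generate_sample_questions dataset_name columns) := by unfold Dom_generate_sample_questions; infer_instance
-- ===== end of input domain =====

-- B does one classifying pass over the columns (flags + first categorical column) instead of
-- A's three filtered lists; same questions, objective: simpler.

-- shared keyword tables (the two Pythons use the same literal keyword tuples)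
def matchesAny (words : List String) (c : String) : Bool := words.any (fun w => PySem.Str.isIn w c)
def kwDate : List String := ["date", "time", "created"]
def kwCat : List String := ["type", "category", "status", "industry", "department"]
def kwNum : List String := ["amount", "value", "price", "sales", "revenue", "count"]

-- ===== PORT A =====
def generate_sample_questions (dataset_name : String) (columns : List String) : List String :=
  let questions : List String := []
  let column_names := columns.map PySem.Str.lower
  let questions := questions ++ ["Show me a summary of this data"]
  let questions := questions ++ ["What are the key patterns in this dataset?"]
  let date_cols := column_names.filter (fun col => matchesAny kwDate col)
  let questions := if !date_cols.isEmpty then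
      questions ++ ["Show me trends over time", "Which day of the week has the most activity?"]
    else questions
  let cat_cols := column_names.filter (fun col => matchesAny kwCat col)
  let questions := match cat_cols with
    | c0 :: _ => questions ++ ["Break down the data by " ++ c0, "Which category performs best?"]
    | [] => questions
  let num_cols := column_names.filter (fun col => matchesAny kwNum col)
  let questions := if !num_cols.isEmpty then
      questions ++ ["What are the top values?", "Show me the distribution of amounts"]
    else questions
  PySem.List.slice questions none (some 6)

-- ===== PORT B =====
def classifyStep (st : Bool × Option String × Bool) (col : String) : Bool × Option String × Bool :=
  let c := PySem.Str.lower col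
  let hd := if !st.1 && matchesAny kwDate c then true else st.1
  let fc := match st.2.1 with
    | some x => some x
    | none => if matchesAny kwCat c then some c else none
  let hn := if !st.2.2 && matchesAny kwNum c then true else st.2.2
  (hd, fc, hn)

def generate_sample_questions_alt (dataset_name : String) (columns : List String) : List String :=
  let st := columns.foldl classifyStep (false, none, false)
  let questions := ["Show me a summary of this data", "What are the key patterns in this dataset?"]
    ++ (if st.1 then ["Show me trends over time", "Which day of the week has the most activity?"] else [])
    ++ (match st.2.1 with
        | some c => ["Break down the data by " ++ c, "Which category performs best?"]
        | none => [])
    ++ (if st.2.2 then ["What are the top values?", "Show me the distribution of amounts"] else [])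
  PySem.List.slice questions none (some 6)

-- ===== PRECONDITION & SPEC =====
def Spec_generate_sample_questions (dataset_name : String) (columns : List String) (out : List String) : Prop := out = generate_sample_questions_alt dataset_name columns
instance (dataset_name : String) (columns : List String) (out : List String) : Decidable (Spec_generate_sample_questions dataset_name columns out) := by unfold Spec_generate_sample_questions; infer_instance

-- ===== CLAIM (what is proved, stated in full; the proofs are below) =====
def Claim_equal_generate_sample_questions : Prop := ∀ (dataset_name : String) (columns : List String), Dom_generate_sample_questions dataset_name columns → Spec_generate_sample_questions dataset_name columns (generate_sample_questions dataset_name columns)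

-- ===== LEMMAS AND PROOFS =====

-- the fold computes (any date keyword?, first categorical column, any numeric keyword?) over the lowered columns
theorem classify_foldl (cols : List String) (st : Bool × Option String × Bool) :
    cols.foldl classifyStep st =
      ((st.1 || (cols.map PySem.Str.lower).any (matchesAny kwDate)),
       (match st.2.1 with
        | some x => some x
        | none => ((cols.map PySem.Str.lower).filter (fun c => matchesAny kwCat c)).head?),
       (st.2.2 || (cols.map PySem.Str.lower).any (matchesAny kwNum))) := by
  induction cols generalizing st with
  | nil => obtain ⟨a, b, c⟩ := st; cases b <;> simp
  | cons col rest ih =>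
    obtain ⟨hd, fc, hn⟩ := st
    simp only [List.foldl_cons, ih, classifyStep, List.map_cons, List.any_cons, List.filter_cons]
    refine Prod.ext ?_ (Prod.ext ?_ ?_)
    · cases hd <;> simp
    · cases fc with
      | some x => simp
      | none =>
        by_cases h : matchesAny kwCat (PySem.Str.lower col) <;> simp [h]
    · cases hn <;> simp

-- xs[:6] on the question list is List.take 6
theorem slice6 (xs : List String) : PySem.List.slice xs none (some 6) = xs.take 6 := by
  simpa using PySem.List.slice_to_natCast xs 6

theorem generate_sample_questions_eq (dataset_name : String) (columns : List String) :
    generate_sample_questions dataset_name columns =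
      generate_sample_questions_alt dataset_name columns := by
  unfold generate_sample_questions generate_sample_questions_alt
  rw [classify_foldl]
  simp only [Bool.false_or, slice6]
  rcases hC : (columns.map PySem.Str.lower).filter (fun c => matchesAny kwCat c) with _ | ⟨c0, rest⟩ <;>
  cases hD : (columns.map PySem.Str.lower).any (matchesAny kwDate) <;>
  cases hN : (columns.map PySem.Str.lower).any (matchesAny kwNum) <;>
  simp_all [List.any_eq_true]

-- ===== VERDICT (by name: the statement is the Claim_ definition above) =====
theorem generate_sample_questions_spec : Claim_equal_generate_sample_questions := by
  intro dataset_name columns _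
  exact generate_sample_questions_eq dataset_name columns
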